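-- pv_equiv track=rewrite | github.com/DaniloNunesBR/jogodonim | JOGO_nim.py | computador_escolhe_jogada
-- ===== SOURCE A (Python) =====
-- def computador_escolhe_jogada(n,m):
--     m = m + 1
--     multiplo = n % m
--     count = 0
--     if multiplo != 0:
--         while multiplo != 0:
--             n = n - 1
--             count = count + 1
--             multiplo = n % m
--         return count
--     else:
--         m = m - 1
--         return m
-- ===== SOURCE B (Python) =====
-- def computador_escolhe_jogada(n, m):
--     r = n % abs(m + 1)
--     return r if r else m
-- ===== Notes on version B (the rewrite author's own statement) =====
-- stated objective: faster
-- what changed: Replaced the decrement-until-divisible while loop by the closed form n % abs(m+1) (returning m when the remainder is 0).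
import Mathlib
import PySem

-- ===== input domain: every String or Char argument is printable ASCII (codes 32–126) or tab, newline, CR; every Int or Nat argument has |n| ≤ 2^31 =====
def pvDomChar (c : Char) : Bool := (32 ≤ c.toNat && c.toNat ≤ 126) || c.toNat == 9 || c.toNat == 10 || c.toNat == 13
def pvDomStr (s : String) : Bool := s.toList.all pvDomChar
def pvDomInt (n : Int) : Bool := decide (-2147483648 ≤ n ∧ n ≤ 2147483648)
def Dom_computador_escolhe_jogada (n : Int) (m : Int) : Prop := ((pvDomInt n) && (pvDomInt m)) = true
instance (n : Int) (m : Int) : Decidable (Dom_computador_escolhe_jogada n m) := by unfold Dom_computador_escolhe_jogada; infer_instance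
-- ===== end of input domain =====

-- One decrement step on a nonzero positive-modulus residue.
theorem pv_emod_sub_one (n k : Int) (hk : 0 < k) (h : n % k ≠ 0) : (n - 1) % k = n % k - 1 := by
  have h1 : 0 ≤ n % k := Int.emod_nonneg n (by omega)
  have h2 : n % k < k := Int.emod_lt_of_pos n hk
  by_cases hk1 : k = 1
  · subst hk1; exact absurd (Int.emod_one n) h
  · rw [Int.sub_emod, Int.emod_eq_of_lt (a := (1:Int)) (by omega) (by omega),
      Int.emod_eq_of_lt (by omega) (by omega)]

-- B replaces A's decrement-until-divisible while loop by the closed form n % abs(m+1); measurably faster (asymptotic).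

-- ===== PORT A =====
-- A's while loop: decrement n, count steps, until n % m1 == 0.
-- The 'm1 ≠ 0' guard only makes the recursion total; Pre_ excludes m1 = 0 (Python raises ZeroDivisionError there).
def nimLoop (m1 : Int) (n : Int) (count : Int) : Int :=
  if h : m1 ≠ 0 ∧ PySem.Int.mod n m1 ≠ 0 then nimLoop m1 (n - 1) (count + 1) else count
termination_by (PySem.Int.mod n m1.natAbs).toNat
decreasing_by
  have hm : (0:Int) < (m1.natAbs : Int) := by
    have := h.1; omega
  have hdvd : ¬ ((m1.natAbs : Int) ∣ n) := fun hd =>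
    h.2 ((PySem.Int.mod_eq_zero_iff_dvd n m1).mpr (Int.natAbs_dvd.mp hd))
  rw [PySem.Int.mod_eq_emod_of_pos hm, PySem.Int.mod_eq_emod_of_pos hm]
  have h1 : 0 ≤ n % (m1.natAbs : Int) := Int.emod_nonneg n (by omega)
  have h2 : n % (m1.natAbs : Int) ≠ 0 := by
    intro h0; exact hdvd (Int.dvd_of_emod_eq_zero h0)
  have h3 := pv_emod_sub_one n _ hm (by
    intro h0; exact hdvd (Int.dvd_of_emod_eq_zero h0))
  omega

def computador_escolhe_jogada (n : Int) (m : Int) : Int :=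
  let m1 := m + 1
  let multiplo := PySem.Int.mod n m1
  if multiplo ≠ 0 then nimLoop m1 n 0 else m

-- ===== PORT B =====
def computador_escolhe_jogada_alt (n : Int) (m : Int) : Int :=
  let r := PySem.Int.mod n ((m + 1).natAbs : Int)
  if r ≠ 0 then r else m

-- ===== PRECONDITION & SPEC =====
-- Pre_ excludes exactly m = -1, where Python's n % (m+1) raises ZeroDivisionError (in both A and B).
def Pre_computador_escolhe_jogada (n : Int) (m : Int) : Prop := m ≠ -1
instance (n : Int) (m : Int) : Decidable (Pre_computador_escolhe_jogada n m) := by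
  unfold Pre_computador_escolhe_jogada; infer_instance

def pvWitness_computador_escolhe_jogada : Int × Int := (10, 3)

def Spec_computador_escolhe_jogada (n : Int) (m : Int) (out : Int) : Prop := out = computador_escolhe_jogada_alt n m
instance (n : Int) (m : Int) (out : Int) : Decidable (Spec_computador_escolhe_jogada n m out) := by unfold Spec_computador_escolhe_jogada; infer_instance

-- ===== CLAIM (what is proved, stated in full; the proofs are below) =====
def Claim_equal_computador_escolhe_jogada : Prop := ∀ (n : Int) (m : Int), Dom_computador_escolhe_jogada n m → Pre_computador_escolhe_jogada n m → Spec_computador_escolhe_jogada n m (computador_escolhe_jogada n m)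

-- ===== LEMMAS AND PROOFS =====

-- mod n m1 = 0 iff mod by the positive |m1| is 0 (same divisibility).
theorem mod_abs_eq_zero_iff (n m1 : Int) :
    PySem.Int.mod n ((m1.natAbs : Nat) : Int) = 0 ↔ PySem.Int.mod n m1 = 0 := by
  rw [PySem.Int.mod_eq_zero_iff_dvd, PySem.Int.mod_eq_zero_iff_dvd]
  exact ⟨fun h => (Int.natAbs_dvd).mp h, fun h => (Int.natAbs_dvd).mpr h⟩

-- The loop computes count + (nonnegative residue of n mod |m1|).
theorem nimLoop_eq (m1 : Int) (hm : m1 ≠ 0) :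
    ∀ n count : Int, nimLoop m1 n count = count + PySem.Int.mod n ((m1.natAbs : Nat) : Int) := by
  have hmpos : (0:Int) < (m1.natAbs : Int) := by omega
  intro n count
  induction n, count using nimLoop.induct m1 with
  | case1 n count h ih =>
      rw [nimLoop, dif_pos h, ih]
      have h2 : PySem.Int.mod n ((m1.natAbs : Nat) : Int) ≠ 0 := by
        intro h0; exact h.2 ((mod_abs_eq_zero_iff n m1).mp h0)
      rw [PySem.Int.mod_eq_emod_of_pos hmpos] at h2 ⊢
      rw [PySem.Int.mod_eq_emod_of_pos hmpos]
      have h1 : 0 ≤ n % (m1.natAbs : Int) := Int.emod_nonneg n (by omega)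
      have h3 := pv_emod_sub_one n _ hmpos h2
      omega
  | case2 n count h =>
      rw [nimLoop]
      simp only [dif_neg h]
      have : PySem.Int.mod n m1 = 0 := by
        by_cases hmod : PySem.Int.mod n m1 = 0
        · exact hmod
        · exact absurd ⟨hm, hmod⟩ h
      rw [(mod_abs_eq_zero_iff n m1).mpr this]
      ring

-- ===== VERDICT (by name: the statement is the Claim_ definition above) =====
theorem computador_escolhe_jogada_spec : Claim_equal_computador_escolhe_jogada := by
  intro n m _ hpre
  unfold Spec_computador_escolhe_jogada computador_escolhe_jogada computador_escolhe_jogada_alt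
  have hm1 : m + 1 ≠ 0 := by
    unfold Pre_computador_escolhe_jogada at hpre; omega
  simp only []
  by_cases hmod : PySem.Int.mod n (m + 1) ≠ 0
  · rw [if_pos hmod, nimLoop_eq (m + 1) hm1 n 0]
    have hr : PySem.Int.mod n (((m + 1).natAbs : Nat) : Int) ≠ 0 := by
      intro h0; exact hmod ((mod_abs_eq_zero_iff n (m + 1)).mp h0)
    rw [if_pos hr]; ring
  · rw [if_neg hmod]
    have hr : ¬ PySem.Int.mod n (((m + 1).natAbs : Nat) : Int) ≠ 0 := by
      intro h; exact h ((mod_abs_eq_zero_iff n (m + 1)).mpr (not_not.mp hmod))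
    rw [if_neg hr]
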